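-- pv_equiv track=rewrite | github.com/simsang1l/Programmers | python/level0/A_강조하기.py | solution
-- ===== SOURCE A (Python) =====
-- def solution(myString):
--     answer = ''
--     for i in myString:
--         if i.lower() == 'a':
--             answer += 'A'
--         else :
--             answer += i.lower()
--
--     return answer
-- ===== SOURCE B (Python) =====
-- def solution(myString):
--     return myString.lower().replace('a', 'A')
-- ===== Notes on version B (the rewrite author's own statement) =====
-- stated objective: faster
-- what changed: Replaces the fused per-character loop (lowercase each char, conditional append via repeated string concatenation) with a pipeline of two linear string builtins: lowercase the whole string, then a single-character replace.
import Mathlib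
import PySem

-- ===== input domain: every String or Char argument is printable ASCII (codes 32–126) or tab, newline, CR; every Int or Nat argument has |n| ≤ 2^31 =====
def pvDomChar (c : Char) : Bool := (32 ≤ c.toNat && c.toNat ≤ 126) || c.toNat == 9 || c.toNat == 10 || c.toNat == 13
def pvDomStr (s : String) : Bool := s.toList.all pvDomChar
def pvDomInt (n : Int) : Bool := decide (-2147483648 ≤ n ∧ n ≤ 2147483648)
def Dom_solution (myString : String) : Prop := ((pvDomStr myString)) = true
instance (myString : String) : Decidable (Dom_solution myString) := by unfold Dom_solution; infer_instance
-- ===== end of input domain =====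

-- B replaces A's fused per-character loop with the builtin pipeline lower().replace('a','A'); objective: idiomatic.

-- ===== PORT A =====
def solution (myString : String) : String :=
  myString.toList.foldl
    (fun answer i =>
      if PySem.Chars.lowerChar i == 'a' then answer.push 'A'
      else answer.push (PySem.Chars.lowerChar i)) ""

-- ===== PORT B =====
def solution_alt (myString : String) : String :=
  PySem.Str.replace (PySem.Str.lower myString) "a" "A"

-- ===== PRECONDITION & SPEC =====
def Spec_solution (myString : String) (out : String) : Prop := out = solution_alt myString
instance (myString : String) (out : String) : Decidable (Spec_solution myString out) := by unfold Spec_solution; infer_instance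

-- ===== CLAIM (what is proved, stated in full; the proofs are below) =====
def Claim_equal_solution : Prop := ∀ (myString : String), Dom_solution myString → Spec_solution myString (solution myString)

-- ===== LEMMAS AND PROOFS =====

-- A's loop, with the accumulator generalized.
theorem solution_foldl (cs : List Char) (a : String) :
    (cs.foldl (fun answer i =>
      if PySem.Chars.lowerChar i == 'a' then answer.push 'A'
      else answer.push (PySem.Chars.lowerChar i)) a).toList =
    a.toList ++ cs.map (fun c =>
      if PySem.Chars.lowerChar c = 'a' then 'A' else PySem.Chars.lowerChar c) := by
  induction cs generalizing a with
  | nil => simp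
  | cons c t ih =>
    simp only [List.foldl_cons, List.map_cons]
    by_cases h : PySem.Chars.lowerChar c = 'a'
    · have hb : (PySem.Chars.lowerChar c == 'a') = true := by simp [h]
      simp only [hb, if_true]
      rw [ih]; simp [h]
    · have hb : (PySem.Chars.lowerChar c == 'a') = false := by simp [h]
      simp only [hb, Bool.false_eq_true, ite_false]
      rw [ih]; simp [h]

-- Single-character replace scans the list once.
theorem replace_go_single (fuel : Nat) (l acc : List Char) (h : l.length ≤ fuel) :
    PySem.Chars.replace.go ['a'] ['A'] fuel l acc =
    acc.reverse ++ l.map (fun c => if c = 'a' then 'A' else c) := by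
  induction fuel generalizing l acc with
  | zero =>
    have : l = [] := List.length_eq_zero_iff.mp (Nat.le_zero.mp h)
    subst this; simp [PySem.Chars.replace.go]
  | succ n ih =>
    cases l with
    | nil => simp [PySem.Chars.replace.go]
    | cons c t =>
      rw [PySem.Chars.replace.go]
      have ht : t.length ≤ n := by simpa using Nat.le_of_succ_le_succ (by simpa using h)
      by_cases hc : c = 'a'
      · subst hc
        have hp : List.isPrefixOf ['a'] ('a' :: t) = true := by
          simp [List.isPrefixOf]
        simp only [hp, if_true, List.length_cons, List.length_nil, List.drop_succ_cons,
          List.drop_zero]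
        rw [ih t (['A'].reverse ++ acc) ht]
        simp
      · have hp : List.isPrefixOf ['a'] (c :: t) = false := by
          simp [List.isPrefixOf]; exact fun e => hc e.symm
        simp only [hp, Bool.false_eq_true, ite_false]
        rw [ih t (c :: acc) ht]
        simp [hc]

theorem replace_single (cs : List Char) :
    PySem.Chars.replace cs ['a'] ['A'] =
    cs.map (fun c => if c = 'a' then 'A' else c) := by
  rw [PySem.Chars.replace]
  simp only [List.isEmpty_cons, Bool.false_eq_true, ite_false]
  exact replace_go_single cs.length cs [] (le_refl _)

-- ===== VERDICT (by name: the statement is the Claim_ definition above) =====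
theorem solution_spec : Claim_equal_solution := by
  intro s _
  unfold Spec_solution solution solution_alt
  apply String.toList_inj.mp
  rw [solution_foldl]
  have : (PySem.Str.replace (PySem.Str.lower s) "a" "A").toList =
      PySem.Chars.replace (PySem.Chars.lower s.toList) "a".toList "A".toList := by
    simp
  rw [this]
  show _ = PySem.Chars.replace (PySem.Chars.lower s.toList) ['a'] ['A']
  rw [replace_single, PySem.Chars.lower, List.map_map]
  simp [Function.comp]
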